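-- pv_equiv track=rewrite | github.com/klauer/ECLI | ecli_splot.py | prune_labels
-- ===== SOURCE A (Python) =====
-- LABEL_COUNT = 25
--
-- def prune_labels(xlabels, ylabels, xpos, ypos,
--                  max_xlabels=LABEL_COUNT, max_ylabels=LABEL_COUNT):
--     if max_xlabels <= 0:
--         xpos = []
--         xlabels = []
--     else:
--         while len(xpos) > max_xlabels:
--             xpos = xpos[::2]
--             xlabels = xlabels[::2]
--
--     if max_ylabels <= 0:
--         ypos = []
--         ylabels = []
--     else:
--         while len(ypos) > max_ylabels:
--             ypos = ypos[::2]
--             ylabels = ylabels[::2]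
--
--     return xlabels, ylabels, xpos, ypos
-- ===== SOURCE B (Python) =====
-- LABEL_COUNT = 25
--
-- def prune_labels(xlabels, ylabels, xpos, ypos,
--                  max_xlabels=LABEL_COUNT, max_ylabels=LABEL_COUNT):
--     def shrink(labels, pos, mx):
--         if mx <= 0:
--             return [], []
--         step, m = 1, len(pos)
--         while m > mx:
--             step *= 2
--             m = (m + 1) // 2
--         if step == 1:
--             return labels, pos
--         return labels[::step], pos[::step]
--
--     xlabels, xpos = shrink(xlabels, xpos, max_xlabels)
--     ylabels, ypos = shrink(ylabels, ypos, max_ylabels)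
--     return xlabels, ylabels, xpos, ypos
-- ===== Notes on version B (the rewrite author's own statement) =====
-- stated objective: alternative
-- what changed: Instead of repeatedly copying both lists halved with [::2] until short enough, B computes the final stride 2^k by a numeric loop on the length alone and takes a single strided slice with that stride.
import Mathlib
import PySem

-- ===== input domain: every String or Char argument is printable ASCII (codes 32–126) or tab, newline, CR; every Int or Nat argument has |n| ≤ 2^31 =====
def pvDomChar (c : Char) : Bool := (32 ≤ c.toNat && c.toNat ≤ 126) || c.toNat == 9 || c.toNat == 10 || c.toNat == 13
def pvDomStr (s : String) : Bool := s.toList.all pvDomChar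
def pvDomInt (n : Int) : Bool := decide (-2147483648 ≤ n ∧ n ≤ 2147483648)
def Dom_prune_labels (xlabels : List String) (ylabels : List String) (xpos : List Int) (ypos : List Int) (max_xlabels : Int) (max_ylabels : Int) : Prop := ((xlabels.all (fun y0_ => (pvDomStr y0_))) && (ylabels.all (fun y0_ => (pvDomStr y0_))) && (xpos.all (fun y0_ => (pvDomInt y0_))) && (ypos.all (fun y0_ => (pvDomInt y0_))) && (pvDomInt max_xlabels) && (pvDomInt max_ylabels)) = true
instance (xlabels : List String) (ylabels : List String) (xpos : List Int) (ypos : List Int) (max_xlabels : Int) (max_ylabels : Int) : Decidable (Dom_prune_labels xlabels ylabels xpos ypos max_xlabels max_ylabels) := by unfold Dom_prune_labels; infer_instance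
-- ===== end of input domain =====

-- B replaces A's repeated halving copies `x[::2]` with one numeric loop computing the
-- final stride 2^k on the length alone and a single strided slice `x[::2**k]`.

-- `xs[::s]` for a positive step s, written as index selection; used by the length lemma
-- the ports' termination cites and by the proofs below.
def pvIdxMap {α : Type} (s : Nat) (xs : List α) : List α :=
  (List.range ((xs.length + s - 1) / s)).filterMap (fun k => xs[s * k]?)

-- index bound: k below the ceil-count selects a valid index
theorem pvMulLt {s k n : Nat} (hs : 0 < s) (hk : k < (n + s - 1) / s) : s * k < n := by
  have h1 : s * (k + 1) ≤ s * ((n + s - 1) / s) := Nat.mul_le_mul_left s hk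
  have h2 : (n + s - 1) / s * s ≤ n + s - 1 := Nat.div_mul_le_self _ _
  have h3 : s * k + s = s * (k + 1) := by ring
  have h4 : 0 < (n + s - 1) / s := by omega
  have h5 : s ≤ n + s - 1 := by
    have := Nat.div_le_self (n + s - 1) s
    by_contra hc
    push_neg at hc
    have : (n + s - 1) / s = 0 := Nat.div_eq_of_lt hc
    omega
  have h6 : s * ((n + s - 1) / s) ≤ n + s - 1 := by rw [mul_comm]; exact h2
  omega

theorem pvFMlen {α : Type} (f : Nat → Option α) (c : Nat) (h : ∀ k < c, (f k).isSome) :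
    ((List.range c).filterMap f).length = c := by
  induction c with
  | zero => simp
  | succ c ih =>
    rw [List.range_succ, List.filterMap_append]
    have hc := h c (by omega)
    cases hfc : f c with
    | none => rw [hfc] at hc; simp at hc
    | some a => simp [hfc, ih (fun k hk => h k (by omega))]

theorem pvLen_idx {α : Type} (s : Nat) (xs : List α) (hs : 0 < s) :
    (pvIdxMap s xs).length = (xs.length + s - 1) / s := by
  unfold pvIdxMap
  exact pvFMlen _ _ (fun k hk => by simp [pvMulLt hs hk])

-- `xs[::s]` (positive step) equals pvIdxMap s xs
theorem pvSlice?_pos {α : Type} (xs : List α) (s : Nat) (hs : 0 < s) :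
    PySem.List.slice? xs none none (s : Int) = some (pvIdxMap s xs) := by
  have h0 : ¬ ((s:Int) = 0) := by omega
  have hneg : ¬ ((s:Int) < 0) := by omega
  simp only [PySem.List.slice?, PySem.List.sliceIndices, if_neg h0, if_neg hneg]
  have hc : (if 0 < (s:Int) then
        if 0 < (xs.length:Int) then (((xs.length:Int) - 0 + (s:Int) - 1) / (s:Int)).toNat else 0
      else if (xs.length:Int) < 0 then ((0 - (xs.length:Int) + -(s:Int) - 1) / -(s:Int)).toNat else 0)
      = (xs.length + s - 1) / s := by
    rw [if_pos (by omega : (0:Int) < (s:Int))]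
    by_cases hn : 0 < xs.length
    · rw [if_pos (by exact_mod_cast hn)]
      have e : ((xs.length:Int) - 0 + (s:Int) - 1) = ((xs.length + s - 1 : Nat) : Int) := by
        omega
      rw [e, ← Int.natCast_div, Int.toNat_natCast]
    · rw [if_neg (by omega)]
      have hn0 : xs.length = 0 := by omega
      rw [hn0, Nat.div_eq_of_lt (by omega)]
  rw [hc]
  unfold pvIdxMap
  have hf : (fun x : Nat => xs[((0:Int) + (s:Int) * (x:Int)).toNat]?) = (fun k : Nat => xs[s * k]?) := by
    funext k
    congr 1
    omega
  rw [hf]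

theorem pvEvery2_len {α : Type} (xs : List α) :
    ((PySem.List.slice? xs none none 2).getD []).length = (xs.length + 1) / 2 := by
  have h : ((2:Nat) : Int) = (2 : Int) := rfl
  rw [← h, pvSlice?_pos xs 2 (by omega), Option.getD_some, pvLen_idx 2 xs (by omega)]
  have e : xs.length + 2 - 1 = xs.length + 1 := by omega
  rw [e]

-- ===== PORT A =====
-- while len(pos) > mx: pos = pos[::2]; labels = labels[::2]
-- The `0 < mx` conjunct only makes the recursion total; A reaches this loop with mx > 0 only.
-- `[::2]` is slice? with step 2 (never none since step ≠ 0), hence `.getD []` is exact.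
def pvLoopA {α β : Type} (labels : List α) (pos : List β) (mx : Int) : List α × List β :=
  if 0 < mx ∧ mx < (pos.length : Int) then
    pvLoopA ((PySem.List.slice? labels none none 2).getD [])
            ((PySem.List.slice? pos none none 2).getD []) mx
  else (labels, pos)
termination_by pos.length
decreasing_by rw [pvEvery2_len]; omega

def prune_labels (xlabels : List String) (ylabels : List String) (xpos : List Int) (ypos : List Int) (max_xlabels : Int) (max_ylabels : Int) : List String × List String × List Int × List Int :=
  match (if max_xlabels ≤ 0 then (([] : List String), ([] : List Int)) else pvLoopA xlabels xpos max_xlabels),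
        (if max_ylabels ≤ 0 then (([] : List String), ([] : List Int)) else pvLoopA ylabels ypos max_ylabels) with
  | (xl, xp), (yl, yp) => (xl, yl, xp, yp)

-- ===== PORT B =====
-- step, m = 1, len(pos); while m > mx: step *= 2; m = (m+1)//2
-- The `0 < mx` conjunct only makes the recursion total; B reaches this loop with mx > 0 only.
def pvStepB (step m : Nat) (mx : Int) : Nat × Nat :=
  if 0 < mx ∧ mx < (m : Int) then pvStepB (step * 2) ((m + 1) / 2) mx else (step, m)
termination_by m
decreasing_by omega

def pvShrinkB {α β : Type} (labels : List α) (pos : List β) (mx : Int) : List α × List β :=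
  if mx ≤ 0 then ([], [])
  else
    let step := (pvStepB 1 pos.length mx).1
    if step = 1 then (labels, pos)
    else ((PySem.List.slice? labels none none (step : Int)).getD [],
          (PySem.List.slice? pos none none (step : Int)).getD [])

def prune_labels_alt (xlabels : List String) (ylabels : List String) (xpos : List Int) (ypos : List Int) (max_xlabels : Int) (max_ylabels : Int) : List String × List String × List Int × List Int :=
  match pvShrinkB xlabels xpos max_xlabels, pvShrinkB ylabels ypos max_ylabels with
  | (xl, xp), (yl, yp) => (xl, yl, xp, yp)

-- ===== PRECONDITION & SPEC =====
def Spec_prune_labels (xlabels : List String) (ylabels : List String) (xpos : List Int) (ypos : List Int) (max_xlabels : Int) (max_ylabels : Int) (out : List String × List String × List Int × List Int) : Prop := out = prune_labels_alt xlabels ylabels xpos ypos max_xlabels max_ylabels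
instance (xlabels : List String) (ylabels : List String) (xpos : List Int) (ypos : List Int) (max_xlabels : Int) (max_ylabels : Int) (out : List String × List String × List Int × List Int) : Decidable (Spec_prune_labels xlabels ylabels xpos ypos max_xlabels max_ylabels out) := by unfold Spec_prune_labels; infer_instance

-- ===== CLAIM (what is proved, stated in full; the proofs are below) =====
def Claim_equal_prune_labels : Prop := ∀ (xlabels : List String) (ylabels : List String) (xpos : List Int) (ypos : List Int) (max_xlabels : Int) (max_ylabels : Int), Dom_prune_labels xlabels ylabels xpos ypos max_xlabels max_ylabels → Spec_prune_labels xlabels ylabels xpos ypos max_xlabels max_ylabels (prune_labels xlabels ylabels xpos ypos max_xlabels max_ylabels)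

-- ===== LEMMAS AND PROOFS =====

theorem pvFMget {α : Type} (f : Nat → Option α) (c : Nat) (h : ∀ k < c, (f k).isSome) (i : Nat) :
    ((List.range c).filterMap f)[i]? = if i < c then f i else none := by
  induction c with
  | zero => simp
  | succ c ih =>
    rw [List.range_succ, List.filterMap_append]
    have hlen : ((List.range c).filterMap f).length = c := pvFMlen f c (fun k hk => h k (by omega))
    have hc := h c (by omega)
    cases hfc : f c with
    | none => rw [hfc] at hc; simp at hc
    | some a =>
      rcases Nat.lt_trichotomy i c with hic | hic | hic
      · rw [List.getElem?_append_left (by omega), ih (fun k hk => h k (by omega))]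
        simp [hic, Nat.lt_succ_of_lt hic]
      · subst hic
        rw [List.getElem?_append_right (by omega)]
        simp [hfc, hlen]
      · rw [List.getElem?_append_right (by omega)]
        have hsing : List.filterMap f [c] = [a] := by simp [hfc]
        rw [hsing, hlen, if_neg (by omega)]
        exact List.getElem?_eq_none (by simp; omega)

theorem pvGet_idx {α : Type} (s : Nat) (xs : List α) (hs : 0 < s) (i : Nat) :
    (pvIdxMap s xs)[i]? = if i < (xs.length + s - 1) / s then xs[s * i]? else none := by
  unfold pvIdxMap
  exact pvFMget _ _ (fun k hk => by simp [pvMulLt hs hk]) i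


theorem pvIdx_one {α : Type} (xs : List α) : pvIdxMap 1 xs = xs := by
  apply List.ext_getElem?
  intro i
  rw [pvGet_idx 1 xs (by omega) i]
  have e : (xs.length + 1 - 1) / 1 = xs.length := by omega
  rw [e, one_mul]
  by_cases hi : i < xs.length
  · rw [if_pos hi]
  · rw [if_neg hi]
    exact (List.getElem?_eq_none (by omega)).symm

-- ⌈⌈n/b⌉/a⌉ = ⌈n/(a*b)⌉
theorem pvCeil (a b n : Nat) (ha : 0 < a) (hb : 0 < b) :
    ((n + b - 1) / b + a - 1) / a = (n + a * b - 1) / (a * b) := by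
  have hab : 0 < a * b := Nat.mul_pos ha hb
  rcases Nat.eq_zero_or_pos n with hn | hn
  · subst hn
    rw [Nat.div_eq_of_lt (show 0 + b - 1 < b by omega)]
    rw [Nat.div_eq_of_lt (show 0 + a - 1 < a by omega),
        Nat.div_eq_of_lt (show 0 + a * b - 1 < a * b by omega)]
  · have e1 : n + b - 1 = (n - 1) + b := by omega
    rw [e1, Nat.add_div_right _ hb]
    have e2 : (n - 1) / b + 1 + a - 1 = (n - 1) / b + a := by
      generalize (n - 1) / b = q
      omega
    rw [e2, Nat.add_div_right _ ha, Nat.div_div_eq_div_mul]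
    have e3 : n + a * b - 1 = (n - 1) + a * b := by omega
    rw [e3, Nat.add_div_right _ hab, mul_comm b a]

theorem pvIdx_comp {α : Type} (a b : Nat) (xs : List α) (ha : 0 < a) (hb : 0 < b) :
    pvIdxMap a (pvIdxMap b xs) = pvIdxMap (a * b) xs := by
  apply List.ext_getElem?
  intro i
  rw [pvGet_idx a _ ha i, pvGet_idx (a * b) xs (by positivity) i,
      pvLen_idx b xs hb, pvCeil a b xs.length ha hb]
  by_cases hi : i < (xs.length + a * b - 1) / (a * b)
  · simp only [hi, if_true]
    rw [pvGet_idx b xs hb]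
    have hk : i < ((xs.length + b - 1) / b + a - 1) / a := by
      rw [pvCeil a b xs.length ha hb]; exact hi
    rw [if_pos (pvMulLt ha hk)]
    congr 1
    ring
  · simp [hi]

theorem pvStepB_pos (step m : Nat) (mx : Int) (h : 0 < step) : 0 < (pvStepB step m mx).1 := by
  fun_induction pvStepB step m mx with
  | case1 step m hc ih => exact ih (by omega)
  | case2 step m hc => exact h

theorem pvStepB_mul (a step m : Nat) (mx : Int) :
    (pvStepB (a * step) m mx).1 = a * (pvStepB step m mx).1 := by
  fun_induction pvStepB step m mx with
  | case1 step m hc ih =>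
    rw [← mul_assoc] at ih
    rw [pvStepB, if_pos hc]
    exact ih
  | case2 step m hc =>
    rw [pvStepB, if_neg hc]

theorem pvMain {α β : Type} (labels : List α) (pos : List β) (mx : Int) (hmx : 0 < mx) :
    pvLoopA labels pos mx =
      (pvIdxMap (pvStepB 1 pos.length mx).1 labels, pvIdxMap (pvStepB 1 pos.length mx).1 pos) := by
  fun_induction pvLoopA labels pos mx with
  | case1 labels pos hc ih =>
    rw [ih]
    have hl2 : (PySem.List.slice? labels none none 2).getD [] = pvIdxMap 2 labels := by
      have : ((2:Nat):Int) = (2:Int) := rfl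
      rw [← this, pvSlice?_pos labels 2 (by omega)]; rfl
    have hp2 : (PySem.List.slice? pos none none 2).getD [] = pvIdxMap 2 pos := by
      have : ((2:Nat):Int) = (2:Int) := rfl
      rw [← this, pvSlice?_pos pos 2 (by omega)]; rfl
    have hlen : ((PySem.List.slice? pos none none 2).getD ([] : List β)).length = (pos.length + 1) / 2 :=
      pvEvery2_len pos
    rw [hlen, hl2, hp2]
    have hstep : (pvStepB 1 pos.length mx).1 = 2 * (pvStepB 1 ((pos.length + 1) / 2) mx).1 := by
      conv_lhs => rw [pvStepB, if_pos hc]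
      rw [show (1:Nat) * 2 = 2 * 1 from by ring, pvStepB_mul 2 1 _ mx]
    set s' := (pvStepB 1 ((pos.length + 1) / 2) mx).1 with hs'
    have hs'pos : 0 < s' := pvStepB_pos _ _ _ (by omega)
    rw [hstep, pvIdx_comp s' 2 labels hs'pos (by omega), pvIdx_comp s' 2 pos hs'pos (by omega),
        mul_comm s' 2]
  | case2 labels pos hc =>
    rw [pvStepB, if_neg hc]
    simp [pvIdx_one]

theorem pvShrink_eq {α β : Type} (labels : List α) (pos : List β) (mx : Int) :
    (if mx ≤ 0 then (([] : List α), ([] : List β)) else pvLoopA labels pos mx) =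
      pvShrinkB labels pos mx := by
  by_cases hmx0 : mx ≤ 0
  · simp [hmx0, pvShrinkB]
  · simp only [pvShrinkB]
    rw [if_neg hmx0, if_neg hmx0, pvMain labels pos mx (by omega)]
    have hspos : 0 < (pvStepB 1 pos.length mx).1 := pvStepB_pos _ _ _ (by omega)
    by_cases h1 : (pvStepB 1 pos.length mx).1 = 1
    · rw [if_pos h1, h1, pvIdx_one, pvIdx_one]
    · rw [if_neg h1, pvSlice?_pos labels _ hspos, pvSlice?_pos pos _ hspos]
      rfl

-- ===== VERDICT (by name: the statement is the Claim_ definition above) =====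
theorem prune_labels_spec : Claim_equal_prune_labels := by
  intro xlabels ylabels xpos ypos mx my _
  unfold Spec_prune_labels prune_labels prune_labels_alt
  rw [← pvShrink_eq xlabels xpos mx, ← pvShrink_eq ylabels ypos my]
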